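-- pv_equiv track=rewrite | github.com/zachringnight/ValueSauce | model.py | _kfold_indices
-- ===== SOURCE A (Python) =====
-- def _kfold_indices(sample_count: int, folds: int) -> list[list[int]]:
--     if folds < 2:
--         raise ValueError("folds must be at least 2")
--     if folds > sample_count:
--         raise ValueError("folds cannot exceed sample count")
--
--     buckets = [[] for _ in range(folds)]
--     for i in range(sample_count):
--         buckets[i % folds].append(i)
--     return buckets
-- ===== SOURCE B (Python) =====
-- def _kfold_indices(sample_count: int, folds: int) -> list[list[int]]:
--     if folds < 2:
--         raise ValueError("folds must be at least 2")
--     if folds > sample_count: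
--         raise ValueError("folds cannot exceed sample count")
--
--     # bucket r is the arithmetic progression r, r+folds, ... with a
--     # closed-form length, no per-index modulo dispatch
--     return [[r + j * folds for j in range((sample_count - r + folds - 1) // folds)]
--             for r in range(folds)]
-- ===== Notes on version B (the rewrite author's own statement) =====
-- stated objective: simpler
-- what changed: Instead of a pass over all sample indices dispatching each via i % folds into mutable buckets, B computes each bucket directly as an arithmetic progression r + j*folds whose length (sample_count - r + folds - 1) // folds is a closed form, iterating only over the folds.
import Mathlib
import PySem

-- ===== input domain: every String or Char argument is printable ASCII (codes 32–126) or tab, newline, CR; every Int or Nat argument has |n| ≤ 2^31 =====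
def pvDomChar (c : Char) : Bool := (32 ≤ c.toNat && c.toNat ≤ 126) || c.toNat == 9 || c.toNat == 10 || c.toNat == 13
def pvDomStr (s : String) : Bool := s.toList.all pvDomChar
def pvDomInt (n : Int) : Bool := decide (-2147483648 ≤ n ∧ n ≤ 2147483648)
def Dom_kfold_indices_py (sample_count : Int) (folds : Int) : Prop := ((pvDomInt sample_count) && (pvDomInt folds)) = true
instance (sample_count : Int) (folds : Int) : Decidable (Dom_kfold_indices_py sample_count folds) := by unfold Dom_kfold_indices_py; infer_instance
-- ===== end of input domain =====

-- B replaces A's per-index modulo dispatch into mutable buckets by computing each fold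
-- bucket directly as an arithmetic progression of closed-form length; objective: simpler.
-- Pre_ excludes exactly the inputs where A raises ValueError (folds < 2 or folds > sample_count).


-- ===== PORT A =====
-- Literal port of A: raise-branches are excluded by Pre_ (port returns []);
-- buckets[i % folds].append(i) is List.modify at (i % folds).toNat — exact since
-- 0 ≤ i % folds < folds = len(buckets) inside the loop.
def kfold_indices_py (sample_count : Int) (folds : Int) : List (List Int) :=
  if folds < 2 then []          -- raise ValueError("folds must be at least 2")
  else if folds > sample_count then []   -- raise ValueError("folds cannot exceed sample count")
  else
    (PySem.List.pyRange 0 sample_count 1).foldl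
      (fun buckets i => buckets.modify (PySem.Int.mod i folds).toNat (fun l => l ++ [i]))
      (List.replicate folds.toNat [])

-- ===== PORT B =====
-- Port of B: each bucket is the progression r + j*folds for j below the
-- closed-form count (sample_count - r + folds - 1) // folds.
def kfold_indices_py_alt (sample_count : Int) (folds : Int) : List (List Int) :=
  if folds < 2 then []          -- raise ValueError("folds must be at least 2")
  else if folds > sample_count then []   -- raise ValueError("folds cannot exceed sample count")
  else
    (List.range folds.toNat).map (fun (r : Nat) =>
      (List.range (PySem.Int.floordiv (sample_count - (r : Int) + folds - 1) folds).toNat).map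
        (fun (j : Nat) => (r : Int) + (j : Int) * folds))

-- ===== PRECONDITION & SPEC =====
-- Pre_ excludes exactly the inputs on which A raises ValueError.
def Pre_kfold_indices_py (sample_count : Int) (folds : Int) : Prop :=
  2 ≤ folds ∧ folds ≤ sample_count
instance (sample_count : Int) (folds : Int) : Decidable (Pre_kfold_indices_py sample_count folds) := by unfold Pre_kfold_indices_py; infer_instance
def pvWitness_kfold_indices_py : Int × Int := (7, 3)

def Spec_kfold_indices_py (sample_count : Int) (folds : Int) (out : List (List Int)) : Prop := out = kfold_indices_py_alt sample_count folds
instance (sample_count : Int) (folds : Int) (out : List (List Int)) : Decidable (Spec_kfold_indices_py sample_count folds out) := by unfold Spec_kfold_indices_py; infer_instance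

-- ===== CLAIM (what is proved, stated in full; the proofs are below) =====
def Claim_equal_kfold_indices_py : Prop := ∀ (sample_count : Int) (folds : Int), Dom_kfold_indices_py sample_count folds → Pre_kfold_indices_py sample_count folds → Spec_kfold_indices_py sample_count folds (kfold_indices_py sample_count folds)

-- ===== LEMMAS AND PROOFS =====

-- Appending one more stop value to a strided range: for 0 ≤ r < s and 0 ≤ b,
-- range(r, b+1, s) = range(r, b, s) plus [b] exactly when b % s = r.
lemma pyRange_step_succ_right (r b s : Int) (hs : 0 < s) (hr0 : 0 ≤ r) (hrs : r < s) (hb : 0 ≤ b) :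
    PySem.List.pyRange r (b + 1) s =
      PySem.List.pyRange r b s ++ (if PySem.Int.mod b s = r then [b] else []) := by
  rw [PySem.List.pyRange_of_pos _ _ hs, PySem.List.pyRange_of_pos _ _ hs,
      PySem.Int.mod_eq_emod_of_pos hs]
  have hsne : s ≠ 0 := ne_of_gt hs
  set q : Int := (b - r) / s with hqdef
  set t : Int := (b - r) % s with htdef
  have ht0 : 0 ≤ t := Int.emod_nonneg _ hsne
  have hts : t < s := Int.emod_lt_of_pos _ hs
  have hqt : t + s * q = b - r := Int.emod_add_mul_ediv (b - r) s
  have hmod : b % s = (r + t) % s := by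
    have hbe : b = (r + t) + s * q := by linarith
    calc b % s = ((r + t) + s * q) % s := by rw [← hbe]
      _ = (r + t) % s := by rw [Int.add_mul_emod_self_left]
  have hrt : b % s = r + t ∨ b % s = r + t - s := by
    by_cases hlt : r + t < s
    · left; rw [hmod, Int.emod_eq_of_lt (by omega) hlt]
    · right
      rw [hmod, ← Int.sub_emod_right (r + t) s,
          Int.emod_eq_of_lt (by omega) (by omega)]
  by_cases hd : b % s = r
  · -- t = 0 : b lands in this bucket
    have ht : t = 0 := by omega
    rw [if_pos hd]
    have hsq : s * q = b - r := by omega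
    have hq0 : 0 ≤ q := by
      have h1 : s * (-1) < s * q := by linarith
      have := Int.lt_of_mul_lt_mul_left h1 (le_of_lt hs)
      omega
    have hrb : r ≤ b := by nlinarith
    have hc1 : (if r < b + 1 then ((b + 1 - r + s - 1) / s).toNat else 0) = q.toNat + 1 := by
      rw [if_pos (by omega)]
      have e1 : b + 1 - r + s - 1 = (q + 1) * s := by linarith
      rw [e1, Int.mul_ediv_cancel _ hsne]
      omega
    have hc2 : (if r < b then ((b - r + s - 1) / s).toNat else 0) = q.toNat := by
      by_cases hrlt : r < b
      · rw [if_pos hrlt]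
        have e2 : b - r + s - 1 = (s - 1) + q * s := by linarith
        rw [e2, Int.add_mul_ediv_right _ _ hsne,
            Int.ediv_eq_zero_of_lt (by omega) (by omega), zero_add]
      · have hq0' : q = 0 := by nlinarith
        rw [if_neg hrlt, hq0']
        rfl
    rw [hc1, hc2, List.range_succ, List.map_append]
    congr 1
    simp only [List.map_cons, List.map_nil]
    congr 1
    rw [Int.toNat_of_nonneg hq0]
    linarith
  · -- t ≠ 0 : b skips this bucket
    have ht : t ≠ 0 := by
      intro h0
      apply hd
      rw [hmod, h0, add_zero, Int.emod_eq_of_lt hr0 hrs]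
    rw [if_neg hd, List.append_nil]
    by_cases hrb : r < b
    · have e1 : b + 1 - r + s - 1 = t + (q + 1) * s := by linarith
      have e2 : b - r + s - 1 = (t - 1) + (q + 1) * s := by linarith
      rw [if_pos (by omega), if_pos hrb, e1, e2,
          Int.add_mul_ediv_right _ _ hsne, Int.add_mul_ediv_right _ _ hsne,
          Int.ediv_eq_zero_of_lt (by omega) (by omega),
          Int.ediv_eq_zero_of_lt (by omega) (by omega)]
    · have hbr : b < r := by
        rcases lt_or_eq_of_le (not_lt.mp hrb) with h | h
        · exact h
        · exfalso
          exact hd (by rw [h]; exact Int.emod_eq_of_lt hr0 hrs)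
      rw [if_neg (by omega), if_neg (by omega)]

-- Loop invariant: after processing indices 0..n-1, bucket r holds range(r, n, folds).
lemma kfold_loop_inv (folds : Int) (hf : 0 < folds) (n : Nat) :
    (PySem.List.pyRange 0 (n : Int) 1).foldl
      (fun buckets i => buckets.modify (PySem.Int.mod i folds).toNat (fun l => l ++ [i]))
      (List.replicate folds.toNat []) =
    (PySem.List.pyRange 0 folds 1).map (fun r => PySem.List.pyRange r (n : Int) folds) := by
  induction n with
  | zero =>
    rw [Nat.cast_zero, PySem.List.pyRange_one_eq_nil (le_refl 0), List.foldl_nil]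
    apply List.ext_getElem
    · simp [PySem.List.length_pyRange_one]
    · intro k h1 h2
      have hk : (k : Int) < folds := by
        have := h1
        simp only [List.length_replicate] at this
        omega
      rw [List.getElem_replicate, List.getElem_map, PySem.List.getElem_pyRange_one,
          zero_add, PySem.List.pyRange_of_pos _ _ hf,
          if_neg (by omega), List.range_zero, List.map_nil]
  | succ n ih =>
    have hcast : ((n + 1 : Nat) : Int) = (n : Int) + 1 := by push_cast; ring
    rw [hcast, PySem.List.pyRange_one_succ_right (Int.natCast_nonneg n), List.foldl_append,
        ih, List.foldl_cons, List.foldl_nil]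
    apply List.ext_getElem
    · simp [PySem.List.length_pyRange_one]
    · intro k h1 h2
      have hklt : (k : Int) < folds := by
        simp only [List.length_modify, List.length_map, PySem.List.length_pyRange_one] at h1
        omega
      have hmn : 0 ≤ PySem.Int.mod (n : Int) folds := PySem.Int.mod_nonneg _ hf
      rw [List.getElem_modify]
      simp only [List.getElem_map, PySem.List.getElem_pyRange_one, zero_add]
      rw [pyRange_step_succ_right _ _ _ hf (Int.natCast_nonneg k) hklt (Int.natCast_nonneg n)]
      by_cases hk : PySem.Int.mod (n : Int) folds = (k : Int)
      · rw [if_pos (by omega), if_pos hk]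
      · rw [if_neg (by omega), if_neg hk, List.append_nil]

-- Bridge: the strided range form equals B's closed-form progression list.
lemma strided_eq_closed (sc folds : Int) (hf : 0 < folds) (hle : folds ≤ sc) :
    (PySem.List.pyRange 0 folds 1).map (fun r => PySem.List.pyRange r sc folds) =
    (List.range folds.toNat).map (fun (r : Nat) =>
      (List.range (PySem.Int.floordiv (sc - (r : Int) + folds - 1) folds).toNat).map
        (fun (j : Nat) => (r : Int) + (j : Int) * folds)) := by
  apply List.ext_getElem
  · simp [PySem.List.length_pyRange_one]
  · intro k h1 h2
    have hk : (k : Int) < folds := by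
      simp only [List.length_map, PySem.List.length_pyRange_one] at h1
      omega
    simp only [List.getElem_map, List.getElem_range, PySem.List.getElem_pyRange_one, zero_add]
    rw [PySem.List.pyRange_of_pos _ _ hf, if_pos (by omega),
        PySem.Int.floordiv_eq_ediv_of_pos hf]
    simp [mul_comm]

-- ===== VERDICT (by name: the statement is the Claim_ definition above) =====
theorem kfold_indices_py_spec : Claim_equal_kfold_indices_py := by
  intro sc folds _ hpre
  obtain ⟨h2, hle⟩ := hpre
  unfold Spec_kfold_indices_py kfold_indices_py kfold_indices_py_alt
  rw [if_neg (by omega), if_neg (by omega), if_neg (by omega), if_neg (by omega)]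
  have hsc : 0 ≤ sc := by omega
  have h1 := kfold_loop_inv folds (by omega) sc.toNat
  rw [Int.toNat_of_nonneg hsc] at h1
  rw [h1]
  exact strided_eq_closed sc folds (by omega) hle
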